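-- pv_equiv track=rewrite | github.com/davidjurgens/reddit-political-affiliation | src/models/psm/collect_features.py | get_post_and_comment_counts
-- ===== SOURCE A (Python) =====
-- def get_post_and_comment_counts(user_features, user):
--     post_counts, comment_counts = 0, 0
--     for entry in user_features[user]:
--         if entry['type'] == 'post':
--             post_counts += 1
--         else:
--             comment_counts += 1
--
--     return post_counts, comment_counts
-- ===== SOURCE B (Python) =====
-- def get_post_and_comment_counts(user_features, user):
--     # Stage 1: build a frequency table of the raw 'type' strings.
--     tally = {}
--     for entry in user_features[user]:
--         t = entry['type']
--         tally[t] = tally.get(t, 0) + 1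
--     # Stage 2: read off posts; everything else is a comment.
--     posts = tally.get('post', 0)
--     comments = sum(n for t, n in tally.items() if t != 'post')
--     return posts, comments
-- ===== Notes on version B (the rewrite author's own statement) =====
-- stated objective: alternative
-- what changed: B builds a frequency table keyed by the raw type string in one pass and then aggregates it (posts = tally['post'], comments = sum of all other buckets), instead of A's two counters incremented inside the loop.
-- outside the precondition, e.g. on get_post_and_comment_counts({}, 'u'): A raises KeyError, B raises KeyError
import Mathlib
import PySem

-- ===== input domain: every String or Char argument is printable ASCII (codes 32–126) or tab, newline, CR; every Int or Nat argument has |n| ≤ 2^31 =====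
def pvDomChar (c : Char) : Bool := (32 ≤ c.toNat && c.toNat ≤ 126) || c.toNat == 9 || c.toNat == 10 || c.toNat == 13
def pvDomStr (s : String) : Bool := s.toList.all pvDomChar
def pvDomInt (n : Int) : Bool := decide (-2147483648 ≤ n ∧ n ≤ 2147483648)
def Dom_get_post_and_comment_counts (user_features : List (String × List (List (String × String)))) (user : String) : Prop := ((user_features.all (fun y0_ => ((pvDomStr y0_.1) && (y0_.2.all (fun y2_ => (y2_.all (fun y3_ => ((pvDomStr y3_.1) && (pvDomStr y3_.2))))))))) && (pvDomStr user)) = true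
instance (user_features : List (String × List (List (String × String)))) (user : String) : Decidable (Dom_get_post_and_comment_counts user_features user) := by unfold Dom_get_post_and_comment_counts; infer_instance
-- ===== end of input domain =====

-- B builds a frequency table of the type strings in one pass, then reads posts = tally['post'] and comments = sum of all other buckets, instead of A's two in-loop counters.


-- first-match association-list lookup (Python dict subscript d[k]; none = KeyError)
def pvLookup? {ν : Type} (l : List (String × ν)) (k : String) : Option ν :=
  match l with
  | [] => none
  | (k', v) :: rest => if k' == k then some v else pvLookup? rest k

-- ===== PORT A =====
def get_post_and_comment_counts (user_features : List (String × List (List (String × String)))) (user : String) : Int × Int :=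
  -- user_features[user]: KeyError excluded by Pre_, so .getD [] is never taken on admitted inputs
  let entries := (pvLookup? user_features user).getD []
  entries.foldl
    (fun (pc : Int × Int) entry =>
      -- entry['type']: missing key (KeyError) excluded by Pre_
      if pvLookup? entry "type" == some "post" then (pc.1 + 1, pc.2) else (pc.1, pc.2 + 1))
    (0, 0)

-- ===== PORT B =====
-- tally[t] = tally.get(t, 0) + 1 (overwrite-in-place on the first match, append if absent)
def pvBump (d : List (String × Int)) (k : String) : List (String × Int) :=
  match d with
  | [] => [(k, 1)]
  | (k', v) :: rest => if k' == k then (k', v + 1) :: rest else (k', v) :: pvBump rest k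

def get_post_and_comment_counts_alt (user_features : List (String × List (List (String × String)))) (user : String) : Int × Int :=
  let entries := (pvLookup? user_features user).getD []
  -- Stage 1: frequency table of the raw type strings (entry['type'] missing-key excluded by Pre_)
  let tally := entries.foldl (fun d e => pvBump d ((pvLookup? e "type").getD "")) []
  -- Stage 2: aggregate the table
  let posts := (pvLookup? tally "post").getD 0
  let comments := ((tally.filter (fun p => p.1 != "post")).map (·.2)).sum
  (posts, comments)

-- ===== PRECONDITION & SPEC =====
-- Pre_ excludes exactly the inputs where Python A raises KeyError: a missing user, or an entry dict without a 'type' key.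
def Pre_get_post_and_comment_counts (user_features : List (String × List (List (String × String)))) (user : String) : Prop :=
  user ∈ user_features.map (·.1) ∧
    ∀ p ∈ user_features, p.1 = user → ∀ e ∈ p.2, "type" ∈ e.map (·.1)

instance (user_features : List (String × List (List (String × String)))) (user : String) : Decidable (Pre_get_post_and_comment_counts user_features user) := by
  unfold Pre_get_post_and_comment_counts; infer_instance

def pvWitness_get_post_and_comment_counts : (List (String × List (List (String × String)))) × String :=
  ([("u", [[("type", "post")], [("type", "comment")]])], "u")

def Spec_get_post_and_comment_counts (user_features : List (String × List (List (String × String)))) (user : String) (out : Int × Int) : Prop := out = get_post_and_comment_counts_alt user_features user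
instance (user_features : List (String × List (List (String × String)))) (user : String) (out : Int × Int) : Decidable (Spec_get_post_and_comment_counts user_features user out) := by unfold Spec_get_post_and_comment_counts; infer_instance

-- ===== CLAIM =====
def Claim_equal_get_post_and_comment_counts : Prop := ∀ (user_features : List (String × List (List (String × String)))) (user : String), Dom_get_post_and_comment_counts user_features user → Pre_get_post_and_comment_counts user_features user → Spec_get_post_and_comment_counts user_features user (get_post_and_comment_counts user_features user)

-- ===== LEMMAS AND PROOFS =====

def pvGetD (d : List (String × Int)) (k : String) : Int := (pvLookup? d k).getD 0

def pvSumNP (d : List (String × Int)) : Int := ((d.filter (fun p => p.1 != "post")).map (·.2)).sum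

theorem pv_loop (l : List (List (String × String))) (p c : Int) :
    l.foldl
      (fun (pc : Int × Int) entry =>
        if pvLookup? entry "type" == some "post" then (pc.1 + 1, pc.2) else (pc.1, pc.2 + 1))
      (p, c)
    = (p + (l.countP (fun e => pvLookup? e "type" == some "post") : Nat),
       c + (l.countP (fun e => !(pvLookup? e "type" == some "post")) : Nat)) := by
  induction l generalizing p c with
  | nil => simp
  | cons e rest ih =>
    rw [List.foldl_cons]
    by_cases h : (pvLookup? e "type" == some "post") = true
    · rw [if_pos h, ih, Prod.mk.injEq]
      simp only [List.countP_cons, h, Bool.not_true, if_true, if_false]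
      constructor <;> push_cast <;> ring
    · rw [if_neg h, ih, Prod.mk.injEq]
      have h' : (pvLookup? e "type" == some "post") = false := by simpa using h
      simp only [List.countP_cons, h', Bool.not_false, if_true, if_false]
      constructor <;> push_cast <;> ring

theorem pvBump_getD (d : List (String × Int)) (k q : String) :
    pvGetD (pvBump d k) q = pvGetD d q + (if k == q then (1 : Int) else 0) := by
  induction d with
  | nil => by_cases h : (k == q) = true <;> simp [pvBump, pvGetD, pvLookup?, h]
  | cons p rest ih =>
    obtain ⟨k', v⟩ := p
    by_cases h1 : (k' == k) = true
    · have hk : k' = k := by simpa using h1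
      subst hk
      by_cases h2 : (k' == q) = true <;> simp [pvBump, pvGetD, pvLookup?, h1, h2]
    · have h1' : (k' == k) = false := by simpa using h1
      by_cases h2 : (k' == q) = true
      · have hq : k' = q := by simpa using h2
        have hne : ¬ k = q := by intro hkq; apply h1; simp [hq, hkq]
        simp [pvBump, pvGetD, pvLookup?, h1', h2, hne]
      · have h2' : (k' == q) = false := by simpa using h2
        simp [pvBump, pvGetD, pvLookup?, h1', h2']
        simpa [pvGetD] using ih

theorem pvBump_sumNP (d : List (String × Int)) (k : String) :
    pvSumNP (pvBump d k) = pvSumNP d + (if k == "post" then (0 : Int) else 1) := by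
  induction d with
  | nil =>
    by_cases h : k = "post"
    · simp [pvBump, pvSumNP, List.filter_cons, h]
    · simp [pvBump, pvSumNP, List.filter_cons, h]
  | cons p rest ih =>
    obtain ⟨k', v⟩ := p
    by_cases h1 : (k' == k) = true
    · have hk : k' = k := by simpa using h1
      subst hk
      by_cases h2 : k' = "post"
      · simp [pvBump, pvSumNP, List.filter_cons, h1, h2]
      · simp [pvBump, pvSumNP, List.filter_cons, h1, h2]
        ring
    · have h1' : (k' == k) = false := by simpa using h1
      by_cases h2 : (k' == "post") = true
      · have h2' : (k' != "post") = false := by simpa using h2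
        simp [pvBump, pvSumNP, List.filter_cons, h1', h2'] at ih ⊢
        omega
      · have h2' : (k' != "post") = true := by simpa using h2
        simp [pvBump, pvSumNP, List.filter_cons, h1', h2'] at ih ⊢
        omega

theorem pv_tally (l : List (List (String × String))) (d : List (String × Int)) :
    pvGetD (l.foldl (fun d e => pvBump d ((pvLookup? e "type").getD "")) d) "post"
      = pvGetD d "post" + (l.countP (fun e => pvLookup? e "type" == some "post") : Nat) ∧
    pvSumNP (l.foldl (fun d e => pvBump d ((pvLookup? e "type").getD "")) d)
      = pvSumNP d + (l.countP (fun e => !(pvLookup? e "type" == some "post")) : Nat) := by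
  induction l generalizing d with
  | nil => simp
  | cons e rest ih =>
    rw [List.foldl_cons]
    obtain ⟨ih1, ih2⟩ := ih (pvBump d ((pvLookup? e "type").getD ""))
    rw [ih1, ih2, pvBump_getD, pvBump_sumNP]
    have hiff : (((pvLookup? e "type").getD "" == "post") = true)
        ↔ ((pvLookup? e "type" == some "post") = true) := by
      cases h : pvLookup? e "type" with
      | none => constructor <;> intro hc <;> simp_all
      | some s => simp
    by_cases h : (pvLookup? e "type" == some "post") = true
    · have hg := hiff.mpr h
      constructor <;> (simp [List.countP_cons, h, hg]; try push_cast; try ring)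
    · have hg : (((pvLookup? e "type").getD "" == "post") = false) := by
        cases hx : ((pvLookup? e "type").getD "" == "post") with
        | false => rfl
        | true => exact absurd (hiff.mp hx) h
      have h' : (pvLookup? e "type" == some "post") = false := by simpa using h
      constructor <;> (simp [List.countP_cons, h', hg]; try push_cast; try ring)

-- ===== VERDICT =====
theorem get_post_and_comment_counts_spec : Claim_equal_get_post_and_comment_counts := by
  intro uf user _ _
  unfold Spec_get_post_and_comment_counts get_post_and_comment_counts get_post_and_comment_counts_alt
  obtain ⟨h1, h2⟩ := pv_tally ((pvLookup? uf user).getD []) []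
  rw [pv_loop, Prod.mk.injEq]
  constructor
  · show _ = pvGetD _ "post"
    rw [h1]; simp [pvGetD, pvLookup?]
  · show _ = pvSumNP _
    rw [h2]; simp [pvSumNP]
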